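-- pv_equiv track=rewrite | github.com/MaRZ113/MasterRallye-PS2 | v1-versions/master_rallye_ps2_unpacker_v47.py | common_suffix_len
-- ===== SOURCE A (Python) =====
-- def common_suffix_len(blobs):
--     if not blobs:
--         return 0
--     n = min(len(b) for b in blobs)
--     i = 0
--     while i < n and all(b[-1-i] == blobs[0][-1-i] for b in blobs[1:]):
--         i += 1
--     return i
-- ===== SOURCE B (Python) =====
-- def _pref(x, y):
--     k = 0
--     for a, b in zip(x, y):
--         if a != b:
--             break
--         k += 1
--     return k
--
-- def common_suffix_len(blobs):
--     if not blobs: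
--         return 0
--     suf = blobs[0][::-1]
--     for b in blobs[1:]:
--         suf = suf[:_pref(suf, b[::-1])]
--     return len(suf)
-- ===== Notes on version B (the rewrite author's own statement) =====
-- stated objective: alternative
-- what changed: Instead of A's column-wise scan (outer loop over suffix positions, inner all() over every blob at that position), B reduces pairwise: it keeps a shrinking candidate suffix (the reversed first blob) and folds over the remaining blobs, truncating the candidate to its common prefix with each reversed blob, returning the candidate's final length.
import Mathlib
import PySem

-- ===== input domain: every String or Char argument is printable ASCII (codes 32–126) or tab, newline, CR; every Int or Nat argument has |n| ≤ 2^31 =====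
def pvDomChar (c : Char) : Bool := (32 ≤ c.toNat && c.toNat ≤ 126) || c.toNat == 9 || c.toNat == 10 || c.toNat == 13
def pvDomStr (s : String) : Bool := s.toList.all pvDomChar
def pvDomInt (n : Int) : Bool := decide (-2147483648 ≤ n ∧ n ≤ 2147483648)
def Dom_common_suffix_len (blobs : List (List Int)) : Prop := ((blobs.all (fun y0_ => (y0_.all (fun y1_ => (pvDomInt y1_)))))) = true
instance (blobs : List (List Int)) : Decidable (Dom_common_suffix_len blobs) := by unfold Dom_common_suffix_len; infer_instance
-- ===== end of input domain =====

-- B replaces A's column-wise scan over all blobs by a pairwise reduce that keeps a shrinking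
-- candidate suffix; same cost, different decomposition; return value only, no mutation.

-- ===== PORT A =====
-- the while loop: 'while i < n and all(b[-1-i] == blobs[0][-1-i] for b in blobs[1:]): i += 1'
def csLoopA (b0 : List Int) (rest : List (List Int)) (n i : Nat) : Nat :=
  if h : i < n ∧ (rest.all fun b =>
      PySem.List.pyGet? b (-1 - (i : Int)) == PySem.List.pyGet? b0 (-1 - (i : Int))) then
    csLoopA b0 rest n (i + 1)
  else i
termination_by n - i
decreasing_by omega

def common_suffix_len (blobs : List (List Int)) : Int :=
  match blobs with
  | [] => 0
  | b0 :: rest =>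
    -- n = min(len(b) for b in blobs); blobs nonempty here, so min? is some
    let n : Nat :=
      match PySem.List.min? ((b0 :: rest).map (fun b => b.length)) (fun x => x) with
      | some m => m
      | none => 0
    (csLoopA b0 rest n 0 : Int)

-- ===== PORT B =====
-- _pref's loop: 'for a, b in zip(x, y): if a != b: break; k += 1'
def prefLoop : List (Int × Int) → Nat → Nat
  | [], k => k
  | (a, b) :: rest, k => if a != b then k else prefLoop rest (k + 1)

def pref (x y : List Int) : Nat := prefLoop (x.zip y) 0

-- 'suf = blobs[0][::-1]; for b in blobs[1:]: suf = suf[:_pref(suf, b[::-1])]; return len(suf)'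
def common_suffix_len_alt (blobs : List (List Int)) : Int :=
  match blobs with
  | [] => 0
  | b0 :: rest =>
    ((rest.foldl (fun suf b => suf.take (pref suf b.reverse)) b0.reverse).length : Int)

-- ===== PRECONDITION & SPEC =====
def Spec_common_suffix_len (blobs : List (List Int)) (out : Int) : Prop := out = common_suffix_len_alt blobs
instance (blobs : List (List Int)) (out : Int) : Decidable (Spec_common_suffix_len blobs out) := by unfold Spec_common_suffix_len; infer_instance

-- ===== CLAIM (what is proved, stated in full; the proofs are below) =====
def Claim_equal_common_suffix_len : Prop := ∀ (blobs : List (List Int)), Dom_common_suffix_len blobs → Spec_common_suffix_len blobs (common_suffix_len blobs)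

-- ===== LEMMAS AND PROOFS =====

-- reference common-prefix length of two lists
def csP : List Int → List Int → Nat
  | [], _ => 0
  | _, [] => 0
  | a :: as, b :: bs => if a = b then 1 + csP as bs else 0

theorem prefLoop_zip (x y : List Int) (k : Nat) :
    prefLoop (x.zip y) k = k + csP x y := by
  induction x generalizing y k with
  | nil => simp [prefLoop, csP]
  | cons a as ih =>
    cases y with
    | nil => simp [prefLoop, csP]
    | cons b bs =>
      simp only [List.zip_cons_cons, prefLoop, csP, bne_iff_ne, ne_eq, ite_not]
      by_cases h : a = b
      · rw [if_pos h, if_pos h, ih]; omega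
      · rw [if_neg h, if_neg h]; omega

theorem pref_eq_csP (x y : List Int) : pref x y = csP x y := by
  simpa using prefLoop_zip x y 0

theorem csP_le_right (x y : List Int) : csP x y ≤ y.length := by
  induction x generalizing y with
  | nil => simp [csP]
  | cons a as ih =>
    cases y with
    | nil => simp [csP]
    | cons b bs =>
      simp only [csP, List.length_cons]
      split_ifs
      · have := ih bs; omega
      · omega

theorem csP_take (x y : List Int) (a : Nat) :
    csP (x.take a) y = min a (csP x y) := by
  induction x generalizing y a with
  | nil => simp [csP]
  | cons h t ih =>
    cases a with
    | zero => simp [csP]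
    | succ a =>
      cases y with
      | nil => simp [csP]
      | cons b bs =>
        simp only [List.take_succ_cons, csP]
        split_ifs
        · rw [ih]; omega
        · omega

theorem csP_lt_iff (x y : List Int) (i : Nat) (h : i ≤ csP x y) :
    (i < csP x y) ↔ (x[i]? = y[i]? ∧ i < x.length) := by
  induction i generalizing x y with
  | zero =>
    cases x with
    | nil => simp [csP]
    | cons a as =>
      cases y with
      | nil => simp [csP]
      | cons b bs =>
        simp only [csP, List.getElem?_cons_zero, List.length_cons]
        split_ifs with hab
        · subst hab; simp
        · simp only [Nat.lt_irrefl, false_iff]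
          rintro ⟨he, _⟩
          exact hab (by simpa using he)
  | succ i ih =>
    cases x with
    | nil => simp [csP] at h
    | cons a as =>
      cases y with
      | nil => simp [csP] at h
      | cons b bs =>
        simp only [csP] at h ⊢
        split_ifs at h ⊢ with hab
        · have h' : i ≤ csP as bs := by omega
          have hi := ih as bs h'
          simp only [List.getElem?_cons_succ, List.length_cons]
          rw [show (i + 1 < 1 + csP as bs) ↔ (i < csP as bs) from by omega, hi]
          constructor <;> rintro ⟨h1, h2⟩ <;> exact ⟨h1, by omega⟩
        · exact absurd h (by omega)

theorem foldl_min_lt_iff {α : Type} (f : α → Nat) (l : List α) (a j : Nat) :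
    j < l.foldl (fun acc x => min acc (f x)) a ↔ (j < a ∧ ∀ x ∈ l, j < f x) := by
  induction l generalizing a with
  | nil => simp
  | cons h t ih =>
    simp only [List.foldl_cons, ih, Nat.lt_min, List.mem_cons]
    constructor
    · rintro ⟨⟨ha, hh⟩, ht⟩
      exact ⟨ha, fun x hx => by rcases hx with rfl | hx; exact hh; exact ht x hx⟩
    · rintro ⟨ha, hall⟩
      exact ⟨⟨ha, hall h (Or.inl rfl)⟩, fun x hx => hall x (Or.inr hx)⟩

theorem foldl_min_le_init {α : Type} (f : α → Nat) (l : List α) (a : Nat) :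
    l.foldl (fun acc x => min acc (f x)) a ≤ a := by
  by_contra h
  have := (foldl_min_lt_iff f l a a).1 (by omega)
  omega

theorem foldl_min_le_elem {α : Type} (f : α → Nat) (l : List α) (a : Nat)
    (x : α) (hx : x ∈ l) : l.foldl (fun acc x => min acc (f x)) a ≤ f x := by
  by_contra h
  have := ((foldl_min_lt_iff f l a (f x)).1 (by omega)).2 x hx
  omega

-- B's fold computes the take of the running minimum
theorem foldB_take (r0 : List Int) (rs : List (List Int)) (a : Nat) (ha : a ≤ r0.length) :
    rs.foldl (fun suf b => suf.take (pref suf b.reverse)) (r0.take a)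
      = r0.take (rs.foldl (fun acc b => min acc (csP r0 b.reverse)) a) := by
  induction rs generalizing a with
  | nil => simp
  | cons b bs ih =>
    simp only [List.foldl_cons]
    rw [pref_eq_csP, csP_take, List.take_take]
    have h1 : min (min a (csP r0 b.reverse)) a = min a (csP r0 b.reverse) := by omega
    rw [h1, ih _ (by omega)]

theorem pyGet?_neg_eq_reverse (b : List Int) (i : Nat) :
    PySem.List.pyGet? b (-1 - (i : Int)) = b.reverse[i]? := by
  by_cases h : i < b.length
  · have h1 : (0:Nat) < i + 1 := by omega
    have h2 : i + 1 ≤ b.length := by omega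
    have hx := PySem.List.pyGet?_neg_natCast b (i + 1) h1 h2
    have harg : (-1 - (i : Int)) = -((i + 1 : Nat) : Int) := by push_cast; ring
    rw [harg, hx, List.getElem?_reverse h]
    congr 1
    omega
  · rw [List.getElem?_eq_none (by simp; omega)]
    rw [PySem.List.pyGet?_eq_none_iff]
    intro hr
    simp [PySem.Raise.InRange] at hr
    omega

-- A's loop reaches the running minimum L
theorem csLoopA_eq (b0 : List Int) (rest : List (List Int)) (n : Nat)
    (Hiff : ∀ j : Nat, j < n ↔ (j < b0.length ∧ ∀ b ∈ rest, j < b.length)) :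
    ∀ i, i ≤ rest.foldl (fun acc b => min acc (csP b0.reverse b.reverse)) n →
      csLoopA b0 rest n i = rest.foldl (fun acc b => min acc (csP b0.reverse b.reverse)) n := by
  set L := rest.foldl (fun acc b => min acc (csP b0.reverse b.reverse)) n with hL
  have hLn : L ≤ n := foldl_min_le_init _ _ _
  have hcond : ∀ i, i ≤ L →
      ((i < n ∧ (rest.all fun b =>
        PySem.List.pyGet? b (-1 - (i : Int)) == PySem.List.pyGet? b0 (-1 - (i : Int)))) ↔ i < L) := by
    intro i hi
    constructor
    · rintro ⟨hin, hall⟩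
      rw [hL, foldl_min_lt_iff]
      refine ⟨hin, fun b hb => ?_⟩
      have hip : i ≤ csP b0.reverse b.reverse := le_trans hi (foldl_min_le_elem _ _ _ b hb)
      rw [csP_lt_iff _ _ _ hip]
      simp only [List.all_eq_true] at hall
      have := hall b hb
      rw [pyGet?_neg_eq_reverse, pyGet?_neg_eq_reverse, beq_iff_eq] at this
      refine ⟨this.symm, ?_⟩
      simpa using ((Hiff i).1 hin).1
    · intro hiL
      have hin : i < n := by omega
      refine ⟨hin, ?_⟩
      simp only [List.all_eq_true]
      intro b hb
      have hip : i ≤ csP b0.reverse b.reverse := le_trans hi (foldl_min_le_elem _ _ _ b hb)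
      have hlt : i < csP b0.reverse b.reverse := by
        rw [hL, foldl_min_lt_iff] at hiL
        exact hiL.2 b hb
      rw [csP_lt_iff _ _ _ hip] at hlt
      rw [pyGet?_neg_eq_reverse, pyGet?_neg_eq_reverse, beq_iff_eq]
      exact hlt.1.symm
  intro i hi
  induction hk : n - i using Nat.strong_induction_on generalizing i with
  | _ k ih =>
    rw [csLoopA]
    by_cases hlt : i < L
    · rw [dif_pos ((hcond i hi).2 hlt)]
      exact ih (n - (i + 1)) (by omega) (i + 1) (by omega) rfl
    · have : i = L := by omega
      rw [dif_neg (fun hc => by have := (hcond i hi).1 hc; omega)]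
      exact this

-- ===== VERDICT (by name: the statement is the Claim_ definition above) =====
theorem common_suffix_len_spec : Claim_equal_common_suffix_len := by
  unfold Claim_equal_common_suffix_len
  intro blobs _
  unfold Spec_common_suffix_len
  match blobs with
  | [] => simp [common_suffix_len, common_suffix_len_alt]
  | b0 :: rest =>
    simp only [common_suffix_len, common_suffix_len_alt, List.map_cons,
      PySem.List.min?_id_cons]
    set n := (rest.map (fun b => b.length)).foldl min b0.length with hn
    have Hiff : ∀ j : Nat, j < n ↔ (j < b0.length ∧ ∀ b ∈ rest, j < b.length) := by
      intro j
      rw [hn]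
      have := foldl_min_lt_iff (fun x => x) (rest.map (fun b => b.length)) b0.length j
      simp only at this
      rw [this]
      simp
    set L := rest.foldl (fun acc b => min acc (csP b0.reverse b.reverse)) n with hL
    set F := rest.foldl (fun acc b => min acc (csP b0.reverse b.reverse)) b0.reverse.length with hF
    have hLF : L = F := by
      have hchar : ∀ j, j < L ↔ j < F := by
        intro j
        rw [hL, hF, foldl_min_lt_iff, foldl_min_lt_iff, foldl_min_lt_iff]
        simp only [List.mem_map, List.length_reverse]
        constructor
        · rintro ⟨⟨h0, _⟩, hp⟩
          exact ⟨h0, hp⟩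
        · rintro ⟨h0, hp⟩
          refine ⟨⟨h0, fun x hx => ?_⟩, hp⟩
          obtain ⟨b, hb, rfl⟩ := hx
          have h1 := hp b hb
          have h2 := csP_le_right b0.reverse b.reverse
          simp only [List.length_reverse] at h2
          omega
      have h1 := hchar L
      have h2 := hchar F
      omega
    have hA : csLoopA b0 rest n 0 = L := csLoopA_eq b0 rest n Hiff 0 (by omega)
    have hB : (rest.foldl (fun suf b => suf.take (pref suf b.reverse)) b0.reverse).length = F := by
      have h0 : b0.reverse = b0.reverse.take b0.reverse.length := by simp
      conv_lhs => rw [h0]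
      rw [foldB_take b0.reverse rest b0.reverse.length le_rfl]
      rw [List.length_take]
      have : F ≤ b0.reverse.length := foldl_min_le_init _ _ _
      omega
    rw [hA, hB, hLF]
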